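-- pv_equiv track=rewrite | github.com/a-leks-icon/pos-tagger-for-small-endangered-languages | scripts/info/get_tag_info.py | get_sent_num
-- ===== SOURCE A (Python) =====
-- def get_sent_num(wd_tag_pairs:list[tuple[str,str]]) -> int:
--     '''Return the number of sentences.
--
--     Compute the number of sentences for a list of word-tag-pairs **wd_tag_pairs** based on the end tag `<E>` and whether the end tag's previous tag is not an end tag.
--
--     Args:
--         wd_tag_pairs: List of word-tag-pairs (tuples).
--
--     Returns:
--         Integer representing the number of sentences.
--     '''
--     sents_num = 0
--     tokens = []
--     for wd,tag in wd_tag_pairs: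
--         if tag != "<E>":
--             tokens.append(tag)
--         elif tokens:
--             sents_num += 1
--             tokens = []
--     return sents_num
-- ===== SOURCE B (Python) =====
-- def get_sent_num(wd_tag_pairs: list[tuple[str, str]]) -> int:
--     '''Count sentences: one per maximal run of non-<E> tags immediately followed by <E>.'''
--     tags = [tag for _, tag in wd_tag_pairs]
--     return sum(1 for a, b in zip(tags, tags[1:]) if a != "<E>" and b == "<E>")
-- ===== Notes on version B (the rewrite author's own statement) =====
-- stated objective: simpler
-- what changed: Replaces the stateful loop that accumulates a token list and resets it on end tags by a stateless one-liner counting adjacent tag pairs (content, <E>) via zip.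
import Mathlib
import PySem

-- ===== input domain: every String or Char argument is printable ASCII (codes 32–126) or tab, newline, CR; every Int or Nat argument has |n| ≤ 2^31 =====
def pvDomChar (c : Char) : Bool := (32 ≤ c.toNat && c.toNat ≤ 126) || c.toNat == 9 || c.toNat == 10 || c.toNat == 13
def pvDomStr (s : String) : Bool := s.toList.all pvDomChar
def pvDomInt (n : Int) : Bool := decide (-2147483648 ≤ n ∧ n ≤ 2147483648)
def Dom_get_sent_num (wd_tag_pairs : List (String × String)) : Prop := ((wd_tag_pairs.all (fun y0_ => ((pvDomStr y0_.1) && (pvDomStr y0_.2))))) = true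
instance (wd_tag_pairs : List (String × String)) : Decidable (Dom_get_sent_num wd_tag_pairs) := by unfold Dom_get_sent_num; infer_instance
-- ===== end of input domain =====

-- B replaces A's stateful token-list loop by a stateless count of adjacent tag pairs (content, "<E>"); objective: simpler.


-- ===== PORT A =====
-- the for-loop over (wd, tag) with state (sents_num, tokens)
def getSentLoop : List (String × String) → Int → List String → Int
  | [], sents_num, _ => sents_num
  | (_, tag) :: rest, sents_num, tokens =>
    if tag ≠ "<E>" then getSentLoop rest sents_num (tokens ++ [tag])
    else if tokens ≠ [] then getSentLoop rest (sents_num + 1) []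
    else getSentLoop rest sents_num tokens

def get_sent_num (wd_tag_pairs : List (String × String)) : Int :=
  getSentLoop wd_tag_pairs 0 []

-- ===== PORT B =====
def get_sent_num_alt (wd_tag_pairs : List (String × String)) : Int :=
  let tags := wd_tag_pairs.map Prod.snd
  Int.ofNat (((tags.zip tags.tail).filter (fun ab => ab.1 != "<E>" && ab.2 == "<E>")).length)

-- ===== PRECONDITION & SPEC =====
def Spec_get_sent_num (wd_tag_pairs : List (String × String)) (out : Int) : Prop := out = get_sent_num_alt wd_tag_pairs
instance (wd_tag_pairs : List (String × String)) (out : Int) : Decidable (Spec_get_sent_num wd_tag_pairs out) := by unfold Spec_get_sent_num; infer_instance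

-- ===== CLAIM (what is proved, stated in full; the proofs are below) =====
def Claim_equal_get_sent_num : Prop := ∀ (wd_tag_pairs : List (String × String)), Dom_get_sent_num wd_tag_pairs → Spec_get_sent_num wd_tag_pairs (get_sent_num wd_tag_pairs)

-- ===== LEMMAS AND PROOFS =====

-- sentence counter over the tag list alone; `prev = true` iff A's token list is nonempty here
def pvF : Bool → List String → Int
  | _, [] => 0
  | prev, t :: ts => (if t = "<E>" ∧ prev = true then 1 else 0) + pvF (t != "<E>") ts

theorem getSentLoop_eq_pvF : ∀ (l : List (String × String)) (n : Int) (toks : List String),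
    getSentLoop l n toks = n + pvF (toks != []) (l.map Prod.snd) := by
  intro l
  induction l with
  | nil => intro n toks; simp [getSentLoop, pvF]
  | cons p rest ih =>
    intro n toks
    obtain ⟨wd, tag⟩ := p
    simp only [getSentLoop, List.map]
    split_ifs with h ht
    · rw [ih]
      have hb : (tag != "<E>") = true := by simpa using h
      have h1 : (toks ++ [tag] != []) = true := by simp
      simp [pvF, hb, h1, h]
    · rw [ih]
      have h' : tag = "<E>" := by simpa using h
      have hb : (toks != []) = true := by simp [ht]
      simp [pvF, h', hb]
      ring
    · rw [ih]
      have h' : tag = "<E>" := by simpa using h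
      have hb : (toks != []) = false := by simp [not_not.mp ht]
      simp [pvF, h', hb]

theorem pvF_shift (prev : Bool) (t : String) (ts : List String) :
    pvF prev (t :: ts) = (if t = "<E>" ∧ prev = true then 1 else 0) + pvF false (t :: ts) := by
  simp [pvF]

theorem pvF_false_eq_zip : ∀ (tags : List String),
    pvF false tags
      = Int.ofNat (((tags.zip tags.tail).filter (fun ab => ab.1 != "<E>" && ab.2 == "<E>")).length) := by
  intro tags
  induction tags with
  | nil => simp [pvF]
  | cons t ts ih =>
    cases ts with
    | nil => simp [pvF]
    | cons u rest =>
      have step : pvF false (t :: u :: rest)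
          = (if u = "<E>" ∧ (t != "<E>") = true then 1 else 0) + pvF false (u :: rest) := by
        rw [show pvF false (t :: u :: rest) = pvF (t != "<E>") (u :: rest) from by simp [pvF]]
        exact pvF_shift _ _ _
      rw [step, ih]
      by_cases h : t = "<E>"
      · simp [h]
      · by_cases hu : u = "<E>" <;> simp [h, hu]; omega

-- ===== VERDICT (by name: the statement is the Claim_ definition above) =====
theorem get_sent_num_spec : Claim_equal_get_sent_num := by
  intro l _
  show get_sent_num l = get_sent_num_alt l
  rw [get_sent_num, getSentLoop_eq_pvF]
  simp only [get_sent_num_alt, ← pvF_false_eq_zip]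
  simp
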